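-- pv_equiv track=rewrite | github.com/markosolopenko/python | Code_wars/binary_and_algorithms/greatest_common_divisor_bitcount.py | binary_gcd
-- ===== SOURCE A (Python) =====
-- def binary_gcd(x, y):
--     """
--
--     :param x:
--     :param y:
--     :return:
--     """
--     # Loop for finding GCD
--     while y:
--         x, y = y, x % y
--     # Converting GCD to binary
--     x = bin(x).replace("0b", "")
--     # Loop for count amount of "1"
--     b = 0
--     for a in x:
--         if a == '0' or a == '-':
--             continue
--         b += 1
--     return b
-- ===== SOURCE B (Python) =====
-- def binary_gcd(x, y):
--     # Same Euclidean loop as the task requires (signed/zero behaviour identical),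
--     # then Brian Kernighan's bit-clearing popcount instead of scanning bin()'s string.
--     while y:
--         x, y = y, x % y
--     n = abs(x)
--     c = 0
--     while n:
--         n &= n - 1
--         c += 1
--     return c
-- ===== Notes on version B (the rewrite author's own statement) =====
-- stated objective: idiomatic
-- what changed: The set-bit count is computed by Brian Kernighan's bit-clearing loop (n &= n-1) on abs(gcd) instead of converting the gcd to a binary string and scanning its characters; the Euclidean gcd loop is kept so signed/zero behaviour matches exactly.
import Mathlib
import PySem

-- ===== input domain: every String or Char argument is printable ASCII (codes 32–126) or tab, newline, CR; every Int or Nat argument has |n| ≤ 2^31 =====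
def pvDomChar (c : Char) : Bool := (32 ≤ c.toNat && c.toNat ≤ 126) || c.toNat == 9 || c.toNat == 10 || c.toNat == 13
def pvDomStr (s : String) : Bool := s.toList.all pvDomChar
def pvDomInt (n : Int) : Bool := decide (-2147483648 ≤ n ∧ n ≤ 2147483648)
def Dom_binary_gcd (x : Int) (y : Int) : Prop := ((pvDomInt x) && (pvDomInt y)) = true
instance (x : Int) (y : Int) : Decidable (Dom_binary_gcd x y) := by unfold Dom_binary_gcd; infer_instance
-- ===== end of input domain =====

-- B replaces A's bin()-string scan with Brian Kernighan's bit-clearing popcount on abs(gcd); same Euclidean gcd loop (idiomatic, not claimed faster).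

-- ===== PORT A =====
-- the Euclidean loop `while y: x, y = y, x % y` — identical in A and in B (Source B), so shared by both ports
def pvGcdLoop (x y : Int) : Int :=
  if y = 0 then x else pvGcdLoop y (PySem.Int.mod x y)
termination_by y.natAbs
decreasing_by
  rcases lt_trichotomy y 0 with h | h | h
  · have := PySem.Int.mod_neg_bounds x h; omega
  · omega
  · have h1 := PySem.Int.mod_nonneg x h; have h2 := PySem.Int.mod_lt x h; omega

-- binary digits of a positive n, most significant first (the digits of bin(n) after "0b")
def pvBinDigits (n : Nat) : List Char :=
  if n = 0 then [] else pvBinDigits (n / 2) ++ [if n % 2 = 1 then '1' else '0']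
termination_by n
decreasing_by omega

-- port of A: gcd loop, then `bin(x).replace("0b", "")` (hand-ported, exact: bin's output
-- contains "0b" exactly once, right after the optional '-'), then the counting for-loop
def binary_gcd (x : Int) (y : Int) : Int :=
  let g := pvGcdLoop x y
  let s : List Char := (if g < 0 then ['-'] else []) ++ (if g = 0 then ['0'] else pvBinDigits g.natAbs)
  s.foldl (fun b a => if a == '0' || a == '-' then b else b + 1) (0 : Int)

-- ===== PORT B =====
-- Kernighan's loop `while n: n &= n - 1; c += 1`; n = abs(x) stays nonnegative, tracked as Nat (exact)
def pvKern (n : Nat) (c : Int) : Int :=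
  if n = 0 then c else pvKern (n &&& (n - 1)) (c + 1)
termination_by n
decreasing_by
  have h1 : n &&& (n - 1) ≤ n - 1 := Nat.and_le_right
  omega

def binary_gcd_alt (x : Int) (y : Int) : Int :=
  pvKern (pvGcdLoop x y).natAbs 0

-- ===== PRECONDITION & SPEC =====
def Spec_binary_gcd (x : Int) (y : Int) (out : Int) : Prop := out = binary_gcd_alt x y
instance (x : Int) (y : Int) (out : Int) : Decidable (Spec_binary_gcd x y out) := by unfold Spec_binary_gcd; infer_instance

-- ===== CLAIM (what is proved, stated in full; the proofs are below) =====
def Claim_equal_binary_gcd : Prop := ∀ (x : Int) (y : Int), Dom_binary_gcd x y → Spec_binary_gcd x y (binary_gcd x y)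

-- ===== LEMMAS AND PROOFS =====

-- number of 1-bits, by halving (proof-side abstraction both ports are related to)
def pvOnes (n : Nat) : Nat :=
  if n = 0 then 0 else pvOnes (n / 2) + n % 2
termination_by n
decreasing_by omega

theorem pvOnes_double (m : Nat) : pvOnes (2 * m) = pvOnes m := by
  by_cases h : m = 0
  · simp [h, pvOnes]
  · rw [pvOnes]
    have h1 : 2 * m ≠ 0 := by omega
    have h2 : 2 * m / 2 = m := by omega
    have h3 : 2 * m % 2 = 0 := by omega
    simp [h1, h2, h3]

theorem pvOnes_odd (m : Nat) : pvOnes (2 * m + 1) = pvOnes m + 1 := by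
  rw [pvOnes]
  have h2 : (2 * m + 1) / 2 = m := by omega
  have h3 : (2 * m + 1) % 2 = 1 := by omega
  simp [h2, h3]

theorem pvLand_odd (m : Nat) : (2 * m + 1) &&& (2 * m) = 2 * m := by
  apply Nat.eq_of_testBit_eq; intro i
  rw [Nat.testBit_and]
  cases i with
  | zero => simp [Nat.testBit_zero]
  | succ i =>
    have h1 : (2 * m + 1) / 2 = m := by omega
    have h2 : (2 * m) / 2 = m := by omega
    simp [Nat.testBit_succ, h1, h2]

theorem pvLand_even (m : Nat) (h : 0 < m) : (2 * m) &&& (2 * m - 1) = 2 * (m &&& (m - 1)) := by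
  have e : 2 * m - 1 = 2 * (m - 1) + 1 := by omega
  rw [e]
  apply Nat.eq_of_testBit_eq; intro i
  rw [Nat.testBit_and]
  cases i with
  | zero => simp [Nat.testBit_zero]
  | succ i =>
    have h1 : (2 * m) / 2 = m := by omega
    have h2 : (2 * (m - 1) + 1) / 2 = m - 1 := by omega
    have h3 : (2 * (m &&& (m - 1))) / 2 = m &&& (m - 1) := by omega
    simp [Nat.testBit_succ, h1, h2, h3, Nat.testBit_and]

-- clearing the lowest set bit removes exactly one 1-bit
theorem pvOnes_land_pred (n : Nat) (hn : 0 < n) : pvOnes (n &&& (n - 1)) + 1 = pvOnes n := by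
  induction n using Nat.strong_induction_on with
  | _ n ih =>
    rcases Nat.even_or_odd n with ⟨m, hm⟩ | ⟨m, hm⟩
    · -- n = 2m, m > 0
      have hm2 : n = 2 * m := by omega
      have hmpos : 0 < m := by omega
      subst hm2
      rw [pvLand_even m hmpos, pvOnes_double, pvOnes_double]
      exact ih m (by omega) hmpos
    · -- n = 2m+1
      have hm2 : n = 2 * m + 1 := by omega
      subst hm2
      have e : 2 * m + 1 - 1 = 2 * m := by omega
      rw [e, pvLand_odd, pvOnes_double, pvOnes_odd]

theorem pvKern_eq (n : Nat) : ∀ c : Int, pvKern n c = c + (pvOnes n : Int) := by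
  induction n using Nat.strong_induction_on with
  | _ n ih =>
    intro c
    by_cases h : n = 0
    · subst h; rw [pvKern.eq_def, pvOnes]; simp
    · rw [pvKern.eq_def]
      have hlt : n &&& (n - 1) < n := by
        have h1 : n &&& (n - 1) ≤ n - 1 := Nat.and_le_right
        omega
      rw [if_neg h, ih _ hlt]
      have := pvOnes_land_pred n (by omega)
      push_cast [← this]; ring

theorem pvCount_binDigits (n : Nat) :
    ∀ b : Int, (pvBinDigits n).foldl (fun b a => if a == '0' || a == '-' then b else b + 1) b
      = b + (pvOnes n : Int) := by
  induction n using Nat.strong_induction_on with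
  | _ n ih =>
    intro b
    by_cases h : n = 0
    · subst h; rw [pvBinDigits, pvOnes]; simp
    · rw [pvBinDigits, pvOnes, if_neg h, if_neg h, List.foldl_append, ih (n / 2) (by omega)]
      rcases Nat.mod_two_eq_zero_or_one n with h2 | h2 <;> simp [h2] <;> push_cast <;> ring

-- ===== VERDICT (by name: the statement is the Claim_ definition above) =====
theorem binary_gcd_spec : Claim_equal_binary_gcd := by
  unfold Claim_equal_binary_gcd
  intro x y _
  unfold Spec_binary_gcd binary_gcd binary_gcd_alt
  set g := pvGcdLoop x y with hg
  by_cases h0 : g = 0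
  · rw [h0]
    have h : pvKern 0 0 = 0 := by rw [pvKern.eq_def]; simp
    simp [h]
  · have hpos : 0 < g.natAbs := by omega
    rw [pvKern_eq]
    by_cases hneg : g < 0
    · simp only [if_pos hneg, if_neg h0, List.singleton_append, List.foldl_cons]
      rw [pvCount_binDigits]
      norm_num
    · simp only [if_neg hneg, if_neg h0, List.nil_append]
      rw [pvCount_binDigits]
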